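-- pv_equiv track=rewrite | github.com/pratik180791/coding-practice | Leetcode/planegates.py | getMinGates
-- ===== SOURCE A (Python) =====
-- def getMinGates(landingTimes, takeOffTimes, maxWaitTime, initialPlanes):
--     # Write your code here
--     gates = {}
--     cnt = initialPlanes
--     for i, land_time in enumerate(landingTimes):
--         if not gates:
--             cnt+=1
--             gates[cnt] = [[land_time, takeOffTimes[i]]]
--         else:
--             add_gate = False
--             for key, val in gates.items():
--                 if land_time>=val[-1][1]:
--                     gates[key].append([land_time, takeOffTimes[i]])
--                     add_gate = True
--                     break
--             if not add_gate:
--                 cnt+=1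
--                 gates[cnt] = [[land_time, takeOffTimes[i]]]
--     return cnt
-- ===== SOURCE B (Python) =====
-- def getMinGates(landingTimes, takeOffTimes, maxWaitTime, initialPlanes):
--     # First-fit gate assignment via an immutable min-segment tree over gate slots:
--     # each leaf holds the last take-off time of that slot (INF = slot unused);
--     # the leftmost fitting slot is found by descending the tree in O(log n).
--     INF = 1 << 62
--     n = len(landingTimes)
--     k = 0
--     while (1 << k) < n:
--         k += 1
--     tree = _build(k)
--     used = 0
--     for land, off in zip(landingTimes, takeOffTimes):
--         if tree[1] <= land:
--             j = _find(tree, k, land)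
--         else:
--             j = used
--             used += 1
--         tree = _update(tree, k, j, off)
--     return initialPlanes + used
--
--
-- def _build(k):
--     # perfect tree of depth k, every leaf = INF; node = ('node', min, left, right)
--     if k == 0:
--         return ('leaf', 1 << 62)
--     sub = _build(k - 1)
--     return ('node', 1 << 62, sub, sub)
--
--
-- def _find(nd, k, x):
--     # leftmost leaf index whose value <= x (caller guarantees nd's min <= x)
--     if k == 0:
--         return 0
--     _, _, l, r = nd
--     if l[1] <= x:
--         return _find(l, k - 1, x)
--     return (1 << (k - 1)) + _find(r, k - 1, x)
--
--
-- def _update(nd, k, j, v):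
--     # functional point update of leaf j
--     if k == 0:
--         return ('leaf', v)
--     _, _, l, r = nd
--     half = 1 << (k - 1)
--     if j < half:
--         l2 = _update(l, k - 1, j, v)
--         return ('node', min(l2[1], r[1]), l2, r)
--     r2 = _update(r, k - 1, j - half, v)
--     return ('node', min(l[1], r2[1]), l, r2)
-- ===== Notes on version B (the rewrite author's own statement) =====
-- stated objective: faster
-- what changed: A scans the whole gate dict linearly for the first gate whose last take-off fits each landing; B keeps the gates' last take-off times in a functional min-segment tree over gate slots and finds the leftmost fitting slot by tree descent, with a point update per plane.
import Mathlib
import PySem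

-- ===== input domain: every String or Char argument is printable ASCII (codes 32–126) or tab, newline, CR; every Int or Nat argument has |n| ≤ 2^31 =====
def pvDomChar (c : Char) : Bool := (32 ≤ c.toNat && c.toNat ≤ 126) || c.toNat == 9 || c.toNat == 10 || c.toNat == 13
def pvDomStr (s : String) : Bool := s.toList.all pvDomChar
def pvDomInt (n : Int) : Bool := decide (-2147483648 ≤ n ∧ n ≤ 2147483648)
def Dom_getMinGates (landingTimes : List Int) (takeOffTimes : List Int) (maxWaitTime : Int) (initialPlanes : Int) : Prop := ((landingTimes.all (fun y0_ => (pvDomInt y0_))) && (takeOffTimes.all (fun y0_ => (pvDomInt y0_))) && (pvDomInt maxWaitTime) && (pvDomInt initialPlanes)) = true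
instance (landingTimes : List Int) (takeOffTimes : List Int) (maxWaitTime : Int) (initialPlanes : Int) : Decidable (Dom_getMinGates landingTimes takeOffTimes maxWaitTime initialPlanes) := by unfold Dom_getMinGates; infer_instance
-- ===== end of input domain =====

-- B replaces A's linear first-fit scan over the gate dict by a min-segment tree over
-- gate slots (leftmost slot whose last take-off time fits, found by tree descent).

-- ===== PORT A =====
-- Python's fixed 2-element lists [land_time, takeoff] are ported as pairs Int × Int.
-- val[-1][1]  (last interval's takeoff); val is always nonempty in A
def pvLastEnd (val : List (Int × Int)) : Int :=
  ((PySem.List.pyGet? val (-1)).getD (0, 0)).2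

-- the inner 'for key, val in gates.items(): if land_time >= val[-1][1]: … break' loop
def pvScanGates (land : Int) : List (Int × List (Int × Int)) → Option Int
  | [] => none
  | (key, val) :: rest =>
      if land ≥ pvLastEnd val then some key else pvScanGates land rest

-- one iteration of A's outer loop; state = (gates, cnt), p = (i, land_time)
def pvStepA (takeOffTimes : List Int)
    (st : PySem.Dict Int (List (Int × Int)) × Int) (p : Int × Int) :
    PySem.Dict Int (List (Int × Int)) × Int :=
  let gates := st.1
  let cnt := st.2
  let land := p.2
  let off := (PySem.List.pyGet? takeOffTimes p.1).getD 0   -- takeOffTimes[i]; Pre_ excludes the IndexError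
  if gates.items.isEmpty then
    (gates.insert (cnt + 1) [(land, off)], cnt + 1)
  else
    match pvScanGates land gates.items with
    | some key => (gates.modify key [] (fun v => v ++ [(land, off)]), cnt)
    | none => (gates.insert (cnt + 1) [(land, off)], cnt + 1)

def getMinGates (landingTimes : List Int) (takeOffTimes : List Int) (maxWaitTime : Int) (initialPlanes : Int) : Int :=
  ((PySem.List.enumerate landingTimes).foldl (pvStepA takeOffTimes) (PySem.Dict.empty, initialPlanes)).2

-- ===== PORT B =====
def pvINF : Int := 4611686018427387904   -- Python's 1 << 62

-- Source B's ('leaf', v) / ('node', mn, l, r) tuples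
inductive PvST
  | leaf : Int → PvST
  | node : Int → PvST → PvST → PvST

def PvST.mn : PvST → Int
  | .leaf v => v
  | .node m _ _ => m

def pvBuild : Nat → PvST
  | 0 => .leaf pvINF
  | k + 1 => .node pvINF (pvBuild k) (pvBuild k)

def pvFindT : PvST → Nat → Int → Nat
  | _, 0, _ => 0
  | .leaf _, _ + 1, _ => 0                     -- unreachable on well-formed trees
  | .node _ l r, k + 1, x =>
      if l.mn ≤ x then pvFindT l k x else 2 ^ k + pvFindT r k x

def pvUpdateT : PvST → Nat → Nat → Int → PvST
  | _, 0, _, v => .leaf v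
  | .leaf w, _ + 1, _, _ => .leaf w            -- unreachable on well-formed trees
  | .node _ l r, k + 1, j, v =>
      if j < 2 ^ k then
        let l2 := pvUpdateT l k j v
        .node (min l2.mn r.mn) l2 r
      else
        let r2 := pvUpdateT r k (j - 2 ^ k) v
        .node (min l.mn r2.mn) l r2

-- Source B's 'while (1 << k) < n: k += 1'
def pvCeilLogGo (n k : Nat) : Nat :=
  if 2 ^ k < n then pvCeilLogGo n (k + 1) else k
termination_by n - 2 ^ k
decreasing_by
  have h2 : 2 ^ k < 2 ^ (k + 1) := Nat.pow_lt_pow_succ (by norm_num)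
  omega

-- one iteration of Source B's loop; state = (tree, used), p = (land, off)
def pvStepB (k : Nat) (st : PvST × Nat) (p : Int × Int) : PvST × Nat :=
  let tree := st.1
  let used := st.2
  if tree.mn ≤ p.1 then
    (pvUpdateT tree k (pvFindT tree k p.1) p.2, used)
  else
    (pvUpdateT tree k used p.2, used + 1)

def getMinGates_alt (landingTimes : List Int) (takeOffTimes : List Int) (maxWaitTime : Int) (initialPlanes : Int) : Int :=
  let k := pvCeilLogGo landingTimes.length 0
  let r := (landingTimes.zip takeOffTimes).foldl (pvStepB k) (pvBuild k, 0)
  initialPlanes + (r.2 : Int)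

-- ===== PRECONDITION & SPEC =====
-- Pre_ excludes exactly the inputs where A raises IndexError (takeOffTimes[i] for some
-- i < len(landingTimes) out of range); it excludes nothing on which A returns.
def Pre_getMinGates (landingTimes : List Int) (takeOffTimes : List Int) (maxWaitTime : Int) (initialPlanes : Int) : Prop :=
  landingTimes.length ≤ takeOffTimes.length
instance (landingTimes : List Int) (takeOffTimes : List Int) (maxWaitTime : Int) (initialPlanes : Int) : Decidable (Pre_getMinGates landingTimes takeOffTimes maxWaitTime initialPlanes) := by unfold Pre_getMinGates; infer_instance
def pvWitness_getMinGates : List Int × List Int × Int × Int := ([3, 1, 7], [5, 6, 9], 0, 2)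


def Spec_getMinGates (landingTimes : List Int) (takeOffTimes : List Int) (maxWaitTime : Int) (initialPlanes : Int) (out : Int) : Prop := out = getMinGates_alt landingTimes takeOffTimes maxWaitTime initialPlanes
instance (landingTimes : List Int) (takeOffTimes : List Int) (maxWaitTime : Int) (initialPlanes : Int) (out : Int) : Decidable (Spec_getMinGates landingTimes takeOffTimes maxWaitTime initialPlanes out) := by unfold Spec_getMinGates; infer_instance

-- ===== CLAIM (what is proved, stated in full; the proofs are below) =====
def Claim_equal_getMinGates : Prop := ∀ (landingTimes : List Int) (takeOffTimes : List Int) (maxWaitTime : Int) (initialPlanes : Int), Dom_getMinGates landingTimes takeOffTimes maxWaitTime initialPlanes → Pre_getMinGates landingTimes takeOffTimes maxWaitTime initialPlanes → Spec_getMinGates landingTimes takeOffTimes maxWaitTime initialPlanes (getMinGates landingTimes takeOffTimes maxWaitTime initialPlanes)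

-- ===== LEMMAS AND PROOFS =====

-- the abstract first-fit step both programs implement: ends = last take-off per gate, in
-- gate-creation order; place (land, off) at the first fitting gate or open a new gate
def ffStep (ends : List Int) (p : Int × Int) : List Int :=
  match ends.findIdx? (fun e => decide (e ≤ p.1)) with
  | some j => ends.set j p.2
  | none => ends ++ [p.2]

def pvEnds (gs : List (Int × List (Int × Int))) : List Int :=
  gs.map (fun q => pvLastEnd q.2)

-- A-side invariant on the dict state
def pvInvA (ip : Int) (gs : List (Int × List (Int × Int))) (cnt : Int) : Prop :=
  cnt = ip + gs.length ∧ (gs.map (·.1)).Nodup ∧ ∀ q ∈ gs, q.1 ≤ cnt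

theorem pvLastEnd_append (v : List (Int × Int)) (a : Int × Int) : pvLastEnd (v ++ [a]) = a.2 := by
  simp [pvLastEnd, PySem.List.pyGet?, PySem.List.pyIdx?]


theorem pvScan_none (land : Int) (gs : List (Int × List (Int × Int))) :
    pvScanGates land gs = none ↔ (pvEnds gs).findIdx? (fun e => decide (e ≤ land)) = none := by
  induction gs with
  | nil => simp [pvScanGates, pvEnds]
  | cons q t ih =>
      obtain ⟨key, val⟩ := q
      by_cases hc : pvLastEnd val ≤ land
      · simp [pvScanGates, pvEnds, List.findIdx?_cons, hc]
      · simp only [pvScanGates, pvEnds, List.map_cons, List.findIdx?_cons] at *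
        simp [hc, ih]


theorem pvScan_some (land : Int) (gs : List (Int × List (Int × Int))) (j : Nat)
    (hj : (pvEnds gs).findIdx? (fun e => decide (e ≤ land)) = some j) :
    ∃ key val, gs[j]? = some (key, val) ∧ pvScanGates land gs = some key := by
  induction gs generalizing j with
  | nil => simp [pvEnds] at hj
  | cons q t ih =>
      obtain ⟨key, val⟩ := q
      by_cases hc : pvLastEnd val ≤ land
      · simp only [pvEnds, List.map_cons, List.findIdx?_cons, hc, decide_true, if_true,
          Option.some.injEq] at hj
        subst hj
        exact ⟨key, val, by simp, by simp [pvScanGates, hc]⟩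
      · simp only [pvEnds, List.map_cons, List.findIdx?_cons, hc, decide_false] at hj
        obtain ⟨j', hj', rfl⟩ := Option.map_eq_some_iff.mp hj
        obtain ⟨k2, v2, hg, hs⟩ := ih j' hj'
        exact ⟨k2, v2, by simpa using hg, by simpa [pvScanGates, hc] using hs⟩


theorem pvMap_markKey (gs : List (Int × List (Int × Int))) (j : Nat) (key : Int)
    (val : List (Int × Int)) (w : List (Int × Int))
    (hnd : (gs.map (·.1)).Nodup) (hj : gs[j]? = some (key, val)) :
    gs.map (fun q => if q.1 == key then (key, w) else q) = gs.set j (key, w) := by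
  induction gs generalizing j with
  | nil => simp at hj
  | cons q t ih =>
      cases j with
      | zero =>
          simp only [List.getElem?_cons_zero, Option.some.injEq] at hj
          subst hj
          simp only [List.map_cons, List.set_cons_zero, beq_self_eq_true, if_true]
          congr 1
          have hnk : ∀ x ∈ t, (fun q => if q.1 == key then (key, w) else q) x = x := by
            intro x hx
            have : x.1 ≠ key := by
              simp only [List.map_cons, List.nodup_cons] at hnd
              intro h
              exact hnd.1 (h ▸ List.mem_map_of_mem hx)
            simp [this]
          exact (List.map_congr_left hnk).trans (List.map_id t)
      | succ j' =>
          simp only [List.getElem?_cons_succ] at hj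
          simp only [List.map_cons, List.nodup_cons] at hnd
          have hq : q.1 ≠ key := by
            intro h
            have : (key, val) ∈ t := List.mem_of_getElem? hj
            exact hnd.1 (h ▸ List.mem_map_of_mem this)
          simp only [List.map_cons, List.set_cons_succ]
          rw [ih j' hnd.2 hj]
          simp [hq]


theorem pvSet_of_getElem? {α : Type} (l : List α) (j : Nat) (a : α) (h : l[j]? = some a) :
    l.set j a = l := by
  have hj : j < l.length := by
    by_contra hge
    rw [List.getElem?_eq_none (by omega)] at h
    cases h
  have hla : l[j] = a := by
    have := List.getElem?_eq_getElem hj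
    rw [this] at h; cases h; rfl
  rw [← hla]; exact List.set_getElem_self hj

-- one A-step refines one ffStep
theorem pvStepA_spec (ip : Int) (tot : List Int) (gates : PySem.Dict Int (List (Int × Int)))
    (cnt : Int) (p : Int × Int) (hInv : pvInvA ip gates.items cnt) :
    pvInvA ip (pvStepA tot (gates, cnt) p).1.items (pvStepA tot (gates, cnt) p).2 ∧
    pvEnds (pvStepA tot (gates, cnt) p).1.items
      = ffStep (pvEnds gates.items) (p.2, (PySem.List.pyGet? tot p.1).getD 0) := by
  obtain ⟨hcnt, hnd, hle⟩ := hInv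
  by_cases hemp : gates.items.isEmpty
  · -- gates empty
    have hnil : gates.items = [] := List.isEmpty_iff.mp hemp
    have hcontains : gates.contains (cnt + 1) = false := by
      simp [PySem.Dict.contains, hnil]
    have hitems : (gates.insert (cnt + 1) [(p.2, (PySem.List.pyGet? tot p.1).getD 0)]).items
        = gates.items ++ [(cnt + 1, [(p.2, (PySem.List.pyGet? tot p.1).getD 0)])] :=
      PySem.Dict.items_insert_of_not_contains _ _ hcontains
    have hstep : pvStepA tot (gates, cnt) p
        = (gates.insert (cnt + 1) [(p.2, (PySem.List.pyGet? tot p.1).getD 0)], cnt + 1) := by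
      simp [pvStepA, hemp]
    have hsingle : pvLastEnd [(p.2, (PySem.List.pyGet? tot p.1).getD 0)]
        = (PySem.List.pyGet? tot p.1).getD 0 := by
      simpa using pvLastEnd_append [] (p.2, (PySem.List.pyGet? tot p.1).getD 0)
    rw [hstep]
    refine ⟨⟨?_, ?_, ?_⟩, ?_⟩
    · rw [hitems, hnil]
      simp only [hnil, List.length_nil, Int.natCast_zero, add_zero] at hcnt
      simp [hcnt]
    · simp [hitems, hnil]
    · intro q hq
      simp only [hitems, hnil, List.nil_append, List.mem_singleton] at hq
      subst hq; simp
    · simp [hitems, hnil, pvEnds, ffStep, hsingle]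
  · -- gates nonempty
    have hempb : gates.items.isEmpty = false := Bool.not_eq_true _ ▸ hemp
    cases hfind : (pvEnds gates.items).findIdx? (fun e => decide (e ≤ p.2)) with
    | some j =>
        obtain ⟨key, val, hgj, hscan⟩ := pvScan_some p.2 gates.items j hfind
        have hmem : (key, val) ∈ gates.items := List.mem_of_getElem? hgj
        have hcontains : gates.contains key = true := by
          simp only [PySem.Dict.contains]
          exact List.any_eq_true.mpr ⟨(key, val), hmem, by simp⟩
        have hgetD : gates.getD key [] = val :=
          PySem.Dict.getD_of_mem_items gates hmem hnd []
        have hstep : pvStepA tot (gates, cnt) p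
            = (gates.modify key [] (fun v => v ++ [(p.2, (PySem.List.pyGet? tot p.1).getD 0)]), cnt) := by
          simp [pvStepA, hempb, hscan]
        have hitems : (gates.modify key [] (fun v => v ++ [(p.2, (PySem.List.pyGet? tot p.1).getD 0)])).items
            = gates.items.set j (key, val ++ [(p.2, (PySem.List.pyGet? tot p.1).getD 0)]) := by
          show (gates.insert key ((gates.getD key []) ++ _)).items = _
          rw [hgetD, PySem.Dict.items_insert_of_contains _ _ hcontains]
          exact pvMap_markKey gates.items j key val _ hnd hgj
        have hkeyj : (gates.items.map (·.1))[j]? = some key := by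
          rw [List.getElem?_map, hgj]; rfl
        have hkeys : (gates.items.set j (key, val ++ [(p.2, (PySem.List.pyGet? tot p.1).getD 0)])).map (·.1)
            = gates.items.map (·.1) := by
          rw [List.map_set]
          exact pvSet_of_getElem? _ j key hkeyj
        rw [hstep]
        refine ⟨⟨?_, ?_, ?_⟩, ?_⟩
        · simp only [hitems]
          simp [hcnt]
        · rw [hitems, hkeys]; exact hnd
        · intro q hq
          rw [hitems] at hq
          rcases List.mem_or_eq_of_mem_set hq with hq' | hq'
          · exact hle q hq'
          · subst hq'
            exact hle (key, val) hmem
        · rw [hitems, pvEnds, List.map_set, ffStep, hfind, pvLastEnd_append]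
          simp [pvEnds]
    | none =>
        have hscan : pvScanGates p.2 gates.items = none := (pvScan_none p.2 gates.items).mpr hfind
        have hcontains : gates.contains (cnt + 1) = false := by
          simp only [PySem.Dict.contains]
          rw [List.any_eq_false]
          intro q hq
          have := hle q hq
          simp only [beq_iff_eq]
          omega
        have hitems : (gates.insert (cnt + 1) [(p.2, (PySem.List.pyGet? tot p.1).getD 0)]).items
            = gates.items ++ [(cnt + 1, [(p.2, (PySem.List.pyGet? tot p.1).getD 0)])] :=
          PySem.Dict.items_insert_of_not_contains _ _ hcontains
        have hstep : pvStepA tot (gates, cnt) p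
            = (gates.insert (cnt + 1) [(p.2, (PySem.List.pyGet? tot p.1).getD 0)], cnt + 1) := by
          simp [pvStepA, hempb, hscan]
        have hsingle : pvLastEnd [(p.2, (PySem.List.pyGet? tot p.1).getD 0)]
            = (PySem.List.pyGet? tot p.1).getD 0 := by
          simpa using pvLastEnd_append [] (p.2, (PySem.List.pyGet? tot p.1).getD 0)
        rw [hstep]
        refine ⟨⟨?_, ?_, ?_⟩, ?_⟩
        · rw [hitems]
          simp only [List.length_append, List.length_cons, List.length_nil]
          push_cast
          omega
        · rw [hitems]
          simp only [List.map_append, List.map_cons, List.map_nil]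
          rw [List.nodup_append]
          refine ⟨hnd, List.nodup_singleton _, ?_⟩
          intro a ha b hb
          obtain rfl : b = cnt + 1 := by simpa using hb
          obtain ⟨q, hq, hq1⟩ := List.mem_map.mp ha
          have := hle q hq
          omega
        · intro q hq
          rw [hitems] at hq
          rcases List.mem_append.mp hq with hq' | hq'
          · have := hle q hq'
            omega
          · simp only [List.mem_singleton] at hq'
            subst hq'
            simp
        · rw [hitems, pvEnds, List.map_append, ffStep, hfind]
          simp [pvEnds, hsingle]

theorem pvFoldA_aux (ip : Int) (lt : List Int) (tot : List Int) : ∀ (s : Nat)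
    (gates : PySem.Dict Int (List (Int × Int))) (cnt : Int),
    pvInvA ip gates.items cnt → s + lt.length ≤ tot.length →
    pvInvA ip ((PySem.List.enumerate lt (s : Int)).foldl (pvStepA tot) (gates, cnt)).1.items
      ((PySem.List.enumerate lt (s : Int)).foldl (pvStepA tot) (gates, cnt)).2 ∧
    pvEnds ((PySem.List.enumerate lt (s : Int)).foldl (pvStepA tot) (gates, cnt)).1.items
      = (lt.zip (tot.drop s)).foldl ffStep (pvEnds gates.items) := by
  induction lt with
  | nil => intro s gates cnt hInv hlen; simpa [PySem.List.enumerate] using hInv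
  | cons x xs ih =>
      intro s gates cnt hInv hlen
      have hs : s < tot.length := by simp at hlen; omega
      have hoff : (PySem.List.pyGet? tot (s : Int)).getD 0 = tot[s] := by
        rw [PySem.List.pyGet?_natCast, List.getElem?_eq_getElem hs]; rfl
      have hdrop : tot.drop s = tot[s] :: tot.drop (s + 1) := List.drop_eq_getElem_cons hs
      have henum : PySem.List.enumerate (x :: xs) (s : Int)
          = ((s : Int), x) :: PySem.List.enumerate xs ((s + 1 : Nat) : Int) := by
        push_cast; rfl
      obtain ⟨hInv1, hends1⟩ := pvStepA_spec ip tot gates cnt ((s : Int), x) hInv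
      have hlen1 : (s + 1) + xs.length ≤ tot.length := by simp at hlen; omega
      have := ih (s + 1) (pvStepA tot (gates, cnt) ((s : Int), x)).1
        (pvStepA tot (gates, cnt) ((s : Int), x)).2 hInv1 hlen1
      rw [henum, List.foldl_cons, hdrop, List.zip_cons_cons, List.foldl_cons]
      refine ⟨?_, ?_⟩
      · simpa using this.1
      · have h2 := this.2
        simp only [Prod.mk.eta] at h2 ⊢
        rw [h2, hends1]
        simp only [hoff]

-- the whole A fold, converted from enumerate+indexing to the zipped ffStep fold
theorem pvFoldA (ip : Int) (lt tot : List Int) (s : Nat)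
    (gates : PySem.Dict Int (List (Int × Int))) (cnt : Int)
    (hInv : pvInvA ip gates.items cnt) (hlen : s + lt.length ≤ tot.length) :
    ((PySem.List.enumerate lt (s : Int)).foldl (pvStepA tot) (gates, cnt)).2
      = ip + (((lt.zip (tot.drop s)).foldl ffStep (pvEnds gates.items)).length : Int) := by
  obtain ⟨hI, hE⟩ := pvFoldA_aux ip lt tot s gates cnt hInv hlen
  have hlen2 : ((PySem.List.enumerate lt (s : Int)).foldl (pvStepA tot) (gates, cnt)).1.items.length
      = ((lt.zip (tot.drop s)).foldl ffStep (pvEnds gates.items)).length := by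
    rw [← hE]; simp [pvEnds]
  rw [hI.1, hlen2]


-- B-side: tree well-formedness and leaves
def PvST.leaves : PvST → List Int
  | .leaf v => [v]
  | .node _ l r => l.leaves ++ r.leaves

def PvWF : Nat → PvST → Prop
  | 0, .leaf _ => True
  | k + 1, .node m l r => PvWF k l ∧ PvWF k r ∧ m = min l.mn r.mn
  | _, _ => False

theorem pvBuild_mn (k : Nat) : (pvBuild k).mn = pvINF := by
  cases k <;> rfl

theorem pvBuild_wf (k : Nat) : PvWF k (pvBuild k) := by
  induction k with
  | zero => trivial
  | succ k ih => exact ⟨ih, ih, by rw [pvBuild_mn, min_self]⟩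


theorem pvBuild_leaves (k : Nat) : (pvBuild k).leaves = List.replicate (2 ^ k) pvINF := by
  induction k with
  | zero => rfl
  | succ k ih =>
      show (pvBuild k).leaves ++ (pvBuild k).leaves = _
      rw [ih, ← List.replicate_add]
      congr 1
      rw [pow_succ]
      omega


theorem pvLeaves_length {k : Nat} {t : PvST} (h : PvWF k t) : t.leaves.length = 2 ^ k := by
  induction k generalizing t with
  | zero => cases t with
      | leaf v => rfl
      | node m l r => cases h
  | succ k ih =>
      cases t with
      | leaf v => cases h
      | node m l r =>
          obtain ⟨hl, hr, -⟩ := h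
          show (l.leaves ++ r.leaves).length = 2 ^ (k + 1)
          rw [List.length_append, ih hl, ih hr, pow_succ]
          omega


theorem pvMn_le_iff {k : Nat} {t : PvST} (h : PvWF k t) (x : Int) :
    t.mn ≤ x ↔ ∃ e ∈ t.leaves, e ≤ x := by
  induction k generalizing t with
  | zero => cases t with
      | leaf v => simp [PvST.mn, PvST.leaves]
      | node m l r => cases h
  | succ k ih =>
      cases t with
      | leaf v => cases h
      | node m l r =>
          obtain ⟨hl, hr, hm⟩ := h
          show m ≤ x ↔ ∃ e ∈ l.leaves ++ r.leaves, e ≤ x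
          rw [hm, min_le_iff, ih hl, ih hr]
          constructor
          · rintro (⟨e, he, hex⟩ | ⟨e, he, hex⟩)
            · exact ⟨e, List.mem_append_left _ he, hex⟩
            · exact ⟨e, List.mem_append_right _ he, hex⟩
          · rintro ⟨e, he, hex⟩
            rcases List.mem_append.mp he with h' | h'
            · exact Or.inl ⟨e, h', hex⟩
            · exact Or.inr ⟨e, h', hex⟩


theorem pvFindT_spec {k : Nat} {t : PvST} (h : PvWF k t) {x : Int} (hx : t.mn ≤ x) :
    t.leaves.findIdx? (fun e => decide (e ≤ x)) = some (pvFindT t k x) := by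
  induction k generalizing t with
  | zero => cases t with
      | leaf v =>
          simp only [PvST.mn] at hx
          simp [PvST.leaves, pvFindT, List.findIdx?_cons, hx]
      | node m l r => cases h
  | succ k ih =>
      cases t with
      | leaf v => cases h
      | node m l r =>
          obtain ⟨hl, hr, hm⟩ := h
          show (l.leaves ++ r.leaves).findIdx? (fun e => decide (e ≤ x)) = some (pvFindT (.node m l r) (k + 1) x)
          rw [List.findIdx?_append]
          by_cases hlm : l.mn ≤ x
          · rw [ih hl hlm]
            simp [pvFindT, hlm]
          · have hnone : l.leaves.findIdx? (fun e => decide (e ≤ x)) = none := by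
              rw [List.findIdx?_eq_none_iff]
              intro e he
              simp only [decide_eq_false_iff_not]
              intro hex
              exact hlm ((pvMn_le_iff hl x).mpr ⟨e, he, hex⟩)
            have hrm : r.mn ≤ x := by
              simp only [PvST.mn] at hx
              rw [hm, min_le_iff] at hx
              rcases hx with h' | h'
              · exact absurd h' hlm
              · exact h'
            rw [hnone, ih hr hrm, pvLeaves_length hl]
            simp [pvFindT, hlm, Nat.add_comm]


theorem pvUpdateT_wf {k : Nat} {t : PvST} (h : PvWF k t) {j : Nat} (hj : j < 2 ^ k) (v : Int) :
    PvWF k (pvUpdateT t k j v) := by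
  induction k generalizing t j with
  | zero => cases t with
      | leaf w => trivial
      | node m l r => cases h
  | succ k ih =>
      cases t with
      | leaf v => cases h
      | node m l r =>
          obtain ⟨hl, hr, hm⟩ := h
          by_cases hj2 : j < 2 ^ k
          · simp only [pvUpdateT, if_pos hj2]
            exact ⟨ih hl hj2, hr, rfl⟩
          · have hj2' : j - 2 ^ k < 2 ^ k := by
              rw [pow_succ] at hj
              omega
            simp only [pvUpdateT, if_neg hj2]
            exact ⟨hl, ih hr hj2', rfl⟩


theorem pvUpdateT_leaves {k : Nat} {t : PvST} (h : PvWF k t) {j : Nat} (hj : j < 2 ^ k) (v : Int) :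
    (pvUpdateT t k j v).leaves = t.leaves.set j v := by
  induction k generalizing t j with
  | zero => cases t with
      | leaf w =>
          interval_cases j
          rfl
      | node m l r => cases h
  | succ k ih =>
      cases t with
      | leaf v => cases h
      | node m l r =>
          obtain ⟨hl, hr, hm⟩ := h
          by_cases hj2 : j < 2 ^ k
          · simp only [pvUpdateT, if_pos hj2]
            show (pvUpdateT l k j v).leaves ++ r.leaves = (l.leaves ++ r.leaves).set j v
            rw [ih hl hj2, List.set_append, if_pos (by rw [pvLeaves_length hl]; exact hj2)]
          · have hj2' : j - 2 ^ k < 2 ^ k := by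
              rw [pow_succ] at hj
              omega
            simp only [pvUpdateT, if_neg hj2]
            show l.leaves ++ (pvUpdateT r k (j - 2 ^ k) v).leaves = (l.leaves ++ r.leaves).set j v
            rw [ih hr hj2', List.set_append, if_neg (by rw [pvLeaves_length hl]; omega),
              pvLeaves_length hl]


-- the whole B fold computes the length of the ffStep fold
theorem pvFoldB (k : Nat) (ps : List (Int × Int)) (tree : PvST) (ends : List Int)
    (hwf : PvWF k tree)
    (hl : tree.leaves = ends ++ List.replicate (2 ^ k - ends.length) pvINF)
    (hbudget : ends.length + ps.length ≤ 2 ^ k)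
    (hbound : ∀ p ∈ ps, p.1 < pvINF) :
    (ps.foldl (pvStepB k) (tree, ends.length)).2 = (ps.foldl ffStep ends).length := by
  induction ps generalizing tree ends with
  | nil => rfl
  | cons p ps ih =>
      have hlen_le : ends.length ≤ 2 ^ k := by simp at hbudget; omega
      have hbp : p.1 < pvINF := hbound p (by simp)
      have hmn_iff : tree.mn ≤ p.1 ↔ ∃ e ∈ ends, e ≤ p.1 := by
        rw [pvMn_le_iff hwf, hl]
        constructor
        · rintro ⟨e, he, hep⟩
          rcases List.mem_append.mp he with h' | h'
          · exact ⟨e, h', hep⟩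
          · have : e = pvINF := List.eq_of_mem_replicate h'
            omega
        · rintro ⟨e, he, hep⟩
          exact ⟨e, List.mem_append_left _ he, hep⟩
      rw [List.foldl_cons, List.foldl_cons]
      by_cases hmn : tree.mn ≤ p.1
      · obtain ⟨e, he, hep⟩ := hmn_iff.mp hmn
        cases hfi : ends.findIdx? (fun e => decide (e ≤ p.1)) with
        | none =>
            rw [List.findIdx?_eq_none_iff] at hfi
            have := hfi e he
            simp [hep] at this
        | some j =>
            have hj : j < ends.length := (List.findIdx?_eq_some_iff_findIdx_eq.mp hfi).1
            have hleaves_fi : tree.leaves.findIdx? (fun e => decide (e ≤ p.1)) = some j := by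
              rw [hl, List.findIdx?_append, hfi, Option.some_or]
            have hft : pvFindT tree k p.1 = j := by
              have := pvFindT_spec hwf hmn
              rw [hleaves_fi] at this
              exact (Option.some.injEq _ _ ▸ this.symm)
            have hstep : pvStepB k (tree, ends.length) p
                = (pvUpdateT tree k j p.2, ends.length) := by
              simp [pvStepB, hmn, hft]
            have hleaves' : (pvUpdateT tree k j p.2).leaves
                = ends.set j p.2 ++ List.replicate (2 ^ k - (ends.set j p.2).length) pvINF := by
              rw [pvUpdateT_leaves hwf (lt_of_lt_of_le hj hlen_le) p.2, hl, List.set_append,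
                if_pos (by simpa using hj)]
              simp
            have hffstep : ffStep ends p = ends.set j p.2 := by
              rw [ffStep, hfi]
            rw [hstep, hffstep]
            have := ih (pvUpdateT tree k j p.2) (ends.set j p.2)
              (pvUpdateT_wf hwf (lt_of_lt_of_le hj hlen_le) p.2) hleaves'
              (by simp at hbudget ⊢; omega) (fun q hq => hbound q (by simp [hq]))
            simpa using this
      · have hfi : ends.findIdx? (fun e => decide (e ≤ p.1)) = none := by
          rw [List.findIdx?_eq_none_iff]
          intro e he
          simp only [decide_eq_false_iff_not]
          exact fun hep => hmn (hmn_iff.mpr ⟨e, he, hep⟩)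
        have hlt : ends.length < 2 ^ k := by simp at hbudget; omega
        have hstep : pvStepB k (tree, ends.length) p
            = (pvUpdateT tree k ends.length p.2, ends.length + 1) := by
          simp [pvStepB, hmn]
        have hrep : (List.replicate (2 ^ k - ends.length) pvINF).set 0 p.2
            = p.2 :: List.replicate (2 ^ k - (ends.length + 1)) pvINF := by
          have h1 : 2 ^ k - ends.length = (2 ^ k - (ends.length + 1)) + 1 := by omega
          rw [h1, List.replicate_succ, List.set_cons_zero]
        have hleaves' : (pvUpdateT tree k ends.length p.2).leaves
            = (ends ++ [p.2]) ++ List.replicate (2 ^ k - (ends ++ [p.2]).length) pvINF := by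
          rw [pvUpdateT_leaves hwf hlt p.2, hl, List.set_append, if_neg (by simp)]
          simp only [Nat.sub_self]
          rw [hrep]
          simp
        have hffstep : ffStep ends p = ends ++ [p.2] := by
          rw [ffStep, hfi]
        rw [hstep, hffstep]
        have := ih (pvUpdateT tree k ends.length p.2) (ends ++ [p.2])
          (pvUpdateT_wf hwf hlt p.2) hleaves'
          (by simp at hbudget ⊢; omega) (fun q hq => hbound q (by simp [hq]))
        simpa using this


theorem pvCeilLogGo_le (n k : Nat) : n ≤ 2 ^ pvCeilLogGo n k := by
  induction k using pvCeilLogGo.induct n with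
  | case1 k hlt ih => rw [pvCeilLogGo, if_pos hlt]; exact ih
  | case2 k hge => rw [pvCeilLogGo, if_neg hge]; omega


-- ===== VERDICT (by name: the statement is the Claim_ definition above) =====
theorem getMinGates_spec : Claim_equal_getMinGates := by
  intro lt tot mwt ip hdom hpre
  unfold Spec_getMinGates
  have hdomL : ∀ y ∈ lt, -2147483648 ≤ y ∧ y ≤ 2147483648 := by
    intro y hy
    simp only [Dom_getMinGates, Bool.and_eq_true, List.all_eq_true, pvDomInt,
      decide_eq_true_eq] at hdom
    exact hdom.1.1.1 y hy
  have hInv0 : pvInvA ip (PySem.Dict.empty : PySem.Dict Int (List (Int × Int))).items ip :=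
    ⟨by simp [PySem.Dict.empty], by simp [PySem.Dict.empty], by simp [PySem.Dict.empty]⟩
  have hA := pvFoldA ip lt tot 0 PySem.Dict.empty ip hInv0 (by simpa using hpre)
  rw [List.drop_zero] at hA
  have hemp : pvEnds (PySem.Dict.empty : PySem.Dict Int (List (Int × Int))).items = [] := by
    simp [pvEnds, PySem.Dict.empty]
  rw [hemp] at hA
  have hbudget : ([] : List Int).length + (lt.zip tot).length ≤ 2 ^ pvCeilLogGo lt.length 0 := by
    have h1 : (lt.zip tot).length ≤ lt.length := by
      rw [List.length_zip]; omega
    have h2 := pvCeilLogGo_le lt.length 0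
    simp only [List.length_nil, Nat.zero_add]
    omega
  have hbound : ∀ p ∈ lt.zip tot, p.1 < pvINF := by
    intro p hp
    have h1 := (List.of_mem_zip hp).1
    have h2 := hdomL p.1 h1
    unfold pvINF
    omega
  have hB := pvFoldB (pvCeilLogGo lt.length 0) (lt.zip tot) (pvBuild _) []
    (pvBuild_wf _) (by simp [pvBuild_leaves]) hbudget hbound
  simp only [List.length_nil] at hB
  rw [getMinGates, getMinGates_alt]
  simp only [Nat.cast_zero] at hA
  rw [hA, hB]
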